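-- pv_equiv track=rewrite | github.com/jayden-ong/LeetCode | hash-table/find-subarrays-with-equal-sum.py | findSubarrays
-- ===== SOURCE A (Python) =====
-- from typing import List
--
-- def findSubarrays(nums: List[int]) -> bool:
--     num_nums = len(nums)
--     sum_set = set()
--     for i in range(num_nums - 1):
--         if nums[i] + nums[i + 1] in sum_set:
--             return True
--         else:
--             sum_set.add(nums[i] + nums[i + 1])
--     return False
-- ===== SOURCE B (Python) =====
-- from typing import List
--
-- def findSubarrays(nums: List[int]) -> bool:
--     sums = sorted(nums[i] + nums[i + 1] for i in range(len(nums) - 1))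
--     return any(a == b for a, b in zip(sums, sums[1:]))
-- ===== Notes on version B (the rewrite author's own statement) =====
-- stated objective: alternative
-- what changed: B sorts the adjacent-pair sums and scans for two equal neighbours, replacing A's hash-set streaming duplicate detection with sort-then-adjacent-scan.
import Mathlib
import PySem

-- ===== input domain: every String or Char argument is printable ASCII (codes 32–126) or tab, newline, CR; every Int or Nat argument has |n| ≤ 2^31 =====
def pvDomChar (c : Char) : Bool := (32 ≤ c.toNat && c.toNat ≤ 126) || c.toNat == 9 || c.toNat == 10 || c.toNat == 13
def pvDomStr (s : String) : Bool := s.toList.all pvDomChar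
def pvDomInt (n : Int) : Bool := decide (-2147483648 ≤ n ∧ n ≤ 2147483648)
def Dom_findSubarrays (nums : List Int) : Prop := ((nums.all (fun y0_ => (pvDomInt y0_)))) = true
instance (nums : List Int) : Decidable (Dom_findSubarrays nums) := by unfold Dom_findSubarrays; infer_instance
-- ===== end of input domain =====

-- B sorts the adjacent-pair sums and scans for equal neighbours, replacing A's
-- hash-set streaming duplicate detection with sort-then-adjacent-scan (objective: alternative).

-- ===== PORT A =====
-- the for-loop over range(n-1) with early 'return True'
def findSubarraysGo (nums : List Int) : List Int → PySem.Set Int → Bool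
  | [], _ => false
  | i :: rest, sumSet =>
    if PySem.Set.contains sumSet (PySem.List.pyGetD nums i 0 + PySem.List.pyGetD nums (i + 1) 0) then
      true
    else
      findSubarraysGo nums rest
        (PySem.Set.add sumSet (PySem.List.pyGetD nums i 0 + PySem.List.pyGetD nums (i + 1) 0))

def findSubarrays (nums : List Int) : Bool :=
  findSubarraysGo nums (PySem.List.pyRange 0 ((nums.length : Int) - 1) 1) PySem.Set.empty

-- ===== PORT B =====
-- any(a == b for a, b in zip(sums, sums[1:])) on the sorted list: adjacent-equal scan
def pvAdjEq : List Int → Bool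
  | a :: b :: rest => a == b || pvAdjEq (b :: rest)
  | _ => false

def findSubarrays_alt (nums : List Int) : Bool :=
  let sums := PySem.List.sorted
      ((PySem.List.pyRange 0 ((nums.length : Int) - 1) 1).map
        (fun i => PySem.List.pyGetD nums i 0 + PySem.List.pyGetD nums (i + 1) 0))
      (fun x => x) false
  pvAdjEq sums

-- ===== PRECONDITION & SPEC =====
def Spec_findSubarrays (nums : List Int) (out : Bool) : Prop := out = findSubarrays_alt nums
instance (nums : List Int) (out : Bool) : Decidable (Spec_findSubarrays nums out) := by unfold Spec_findSubarrays; infer_instance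

-- ===== CLAIM =====
def Claim_equal_findSubarrays : Prop := ∀ (nums : List Int), Dom_findSubarrays nums → Spec_findSubarrays nums (findSubarrays nums)

-- ===== LEMMAS AND PROOFS =====

-- A's loop, abstracted over the already-computed list of pair sums
def pvDupAux : List Int → PySem.Set Int → Bool
  | [], _ => false
  | x :: xs, seen =>
    if PySem.Set.contains seen x then true else pvDupAux xs (PySem.Set.add seen x)

theorem findSubarraysGo_eq_dupAux (nums : List Int) :
    ∀ (idxs : List Int) (seen : PySem.Set Int),
      findSubarraysGo nums idxs seen =
        pvDupAux (idxs.map (fun i => PySem.List.pyGetD nums i 0 + PySem.List.pyGetD nums (i + 1) 0)) seen := by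
  intro idxs
  induction idxs with
  | nil => intro seen; rfl
  | cons i rest ih =>
    intro seen
    simp only [findSubarraysGo, pvDupAux, List.map]
    split_ifs with h
    · rfl
    · exact ih _

theorem pvDupAux_spec :
    ∀ (xs : List Int) (seen : PySem.Set Int),
      pvDupAux xs seen = !decide (xs.Nodup ∧ ∀ x ∈ xs, x ∉ seen) := by
  intro xs
  induction xs with
  | nil => intro seen; simp [pvDupAux]
  | cons x xs ih =>
    intro seen
    simp only [pvDupAux]
    by_cases h : x ∈ seen
    · rw [if_pos ((PySem.Set.contains_iff seen x).mpr h)]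
      simp [h]
    · rw [if_neg (by simpa using (fun hc => h ((PySem.Set.contains_iff seen x).mp hc))), ih]
      have hmem : ∀ y, y ∈ PySem.Set.add seen x ↔ y ∈ seen ∨ y = x := fun y => PySem.Set.mem_add seen x y
      congr 1
      rw [decide_eq_decide]
      constructor
      · rintro ⟨hn, hall⟩
        have hx : x ∉ xs := fun hx => hall x hx ((hmem x).mpr (Or.inr rfl))
        refine ⟨List.nodup_cons.mpr ⟨hx, hn⟩, ?_⟩
        intro y hy
        rcases List.mem_cons.mp hy with h' | h'
        · exact h' ▸ h
        · exact fun hc => hall y h' ((hmem y).mpr (Or.inl hc))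
      · rintro ⟨hn, hall⟩
        obtain ⟨hx, hn'⟩ := List.nodup_cons.mp hn
        refine ⟨hn', ?_⟩
        intro y hy hc
        rcases (hmem y).mp hc with h' | h'
        · exact hall y (List.mem_cons.mpr (Or.inr hy)) h'
        · exact hx (h' ▸ hy)

-- on a ≤-sorted list, an adjacent equal pair exists iff the list has a duplicate
theorem pvAdjEq_of_pairwise :
    ∀ (xs : List Int), xs.Pairwise (· ≤ ·) → pvAdjEq xs = !decide xs.Nodup := by
  intro xs
  induction xs with
  | nil => intro _; simp [pvAdjEq]
  | cons a t ih =>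
    intro hp
    cases t with
    | nil => simp [pvAdjEq]
    | cons b t' =>
      obtain ⟨hab, hp'⟩ := List.pairwise_cons.mp hp
      by_cases h : a = b
      · subst h
        have : ¬ (a :: a :: t').Nodup := by simp
        simp [pvAdjEq, this]
      · have hlt : a < b := lt_of_le_of_ne (hab b (by simp)) h
        have hnm : a ∉ b :: t' := by
          intro hmem
          rcases List.mem_cons.mp hmem with h' | h'
          · exact h h'
          · have hb := (List.pairwise_cons.mp hp').1 a h'
            omega
        have heq : (a :: b :: t').Nodup ↔ (b :: t').Nodup := by
          simp [List.nodup_cons, hnm]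
        rw [show pvAdjEq (a :: b :: t') = (a == b || pvAdjEq (b :: t')) from rfl,
            ih hp']
        by_cases hn : (b :: t').Nodup <;> simp [h, hn, heq.mpr, heq]
  
-- ===== VERDICT =====
theorem findSubarrays_spec : Claim_equal_findSubarrays := by
  intro nums _
  unfold Spec_findSubarrays findSubarrays findSubarrays_alt
  rw [findSubarraysGo_eq_dupAux, pvDupAux_spec]
  simp only [PySem.Set.empty, List.not_mem_nil, not_false_iff, implies_true, and_true]
  set sums := (PySem.List.pyRange 0 ((nums.length : Int) - 1) 1).map
      (fun i => PySem.List.pyGetD nums i 0 + PySem.List.pyGetD nums (i + 1) 0) with hs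
  have hperm : (PySem.List.sorted sums (fun x => x) false).Perm sums :=
    PySem.List.sorted_perm sums (fun x => x) false
  have hpw : (PySem.List.sorted sums (fun x => x) false).Pairwise (· ≤ ·) := by
    simpa using PySem.List.sorted_pairwise sums (fun x => x)
  rw [pvAdjEq_of_pairwise _ hpw]
  congr 1
  rw [decide_eq_decide]
  exact (hperm.nodup_iff).symm
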